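-- pv_equiv track=rewrite | github.com/TheMattBerman/landing-page-factory | skills/page-build/scripts/prepare-build-meta.py | choose_lifestyle_image
-- ===== SOURCE A (Python) =====
-- def choose_lifestyle_image(images: list[dict]):
--     for image in images:
--         if image.get("preservation_class") == "branded_environment":
--             return image
--     for image in images:
--         shot_id = (image.get("shot_id") or "").lower()
--         if "lifestyle" in shot_id:
--             return image
--     return None
-- ===== SOURCE B (Python) =====
-- def choose_lifestyle_image(images: list[dict]):
--     fallback = None
--     for image in images:
--         if image.get("preservation_class") == "branded_environment":
--             return image
--         if fallback is None and "lifestyle" in (image.get("shot_id") or "").lower():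
--             fallback = image
--     return fallback
-- ===== Notes on version B (the rewrite author's own statement) =====
-- stated objective: simpler
-- what changed: Replaces A's two sequential scans (first for a branded image, then a second full scan for a lifestyle shot) with a single pass that returns immediately on a branded image and remembers the first lifestyle image as a fallback.
import Mathlib
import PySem

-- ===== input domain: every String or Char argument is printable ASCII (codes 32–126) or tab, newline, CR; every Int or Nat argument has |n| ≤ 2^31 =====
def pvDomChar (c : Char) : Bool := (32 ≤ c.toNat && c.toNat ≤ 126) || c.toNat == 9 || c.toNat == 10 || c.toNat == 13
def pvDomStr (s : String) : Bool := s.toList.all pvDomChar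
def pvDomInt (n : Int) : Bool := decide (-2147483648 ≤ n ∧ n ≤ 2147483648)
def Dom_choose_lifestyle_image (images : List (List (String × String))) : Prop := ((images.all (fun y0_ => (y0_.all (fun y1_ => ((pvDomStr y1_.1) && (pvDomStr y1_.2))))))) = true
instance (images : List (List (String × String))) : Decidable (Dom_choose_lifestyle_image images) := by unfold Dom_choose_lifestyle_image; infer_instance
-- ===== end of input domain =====

-- B replaces A's two sequential scans with one pass keeping a first-lifestyle fallback (objective: simpler decomposition; same O(n) cost).

-- ===== PORT A =====
-- image.get("preservation_class") == "branded_environment"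
def pvIsBranded (image : List (String × String)) : Bool :=
  (PySem.Dict.mk image).get? "preservation_class" == some "branded_environment"

-- shot_id = (image.get("shot_id") or "").lower(); "lifestyle" in shot_id
-- ('x or ""' yields "" exactly when the lookup is missing or the empty string)
def pvIsLifestyle (image : List (String × String)) : Bool :=
  PySem.Str.isIn "lifestyle" (PySem.Str.lower (((PySem.Dict.mk image).get? "shot_id").getD ""))

-- first loop of A
def pvLoopBranded : List (List (String × String)) → Option (List (String × String))
  | [] => none
  | image :: rest => if pvIsBranded image then some image else pvLoopBranded rest

-- second loop of A
def pvLoopLifestyle : List (List (String × String)) → Option (List (String × String))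
  | [] => none
  | image :: rest => if pvIsLifestyle image then some image else pvLoopLifestyle rest

def choose_lifestyle_image (images : List (List (String × String))) : Option (List (String × String)) :=
  match pvLoopBranded images with
  | some image => some image
  | none => pvLoopLifestyle images

-- ===== PORT B =====
-- single loop with a fallback accumulator, as in Source B
def pvOnePass (images : List (List (String × String))) (fallback : Option (List (String × String))) :
    Option (List (String × String)) :=
  match images with
  | [] => fallback
  | image :: rest =>
      if pvIsBranded image then some image
      else pvOnePass rest (if fallback.isNone && pvIsLifestyle image then some image else fallback)

def choose_lifestyle_image_alt (images : List (List (String × String))) : Option (List (String × String)) :=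
  pvOnePass images none

-- ===== PRECONDITION & SPEC =====
def Spec_choose_lifestyle_image (images : List (List (String × String))) (out : Option (List (String × String))) : Prop := out = choose_lifestyle_image_alt images
instance (images : List (List (String × String))) (out : Option (List (String × String))) : Decidable (Spec_choose_lifestyle_image images out) := by unfold Spec_choose_lifestyle_image; infer_instance

-- ===== CLAIM (what is proved, stated in full; the proofs are below) =====
def Claim_equal_choose_lifestyle_image : Prop := ∀ (images : List (List (String × String))), Dom_choose_lifestyle_image images → Spec_choose_lifestyle_image images (choose_lifestyle_image images)

-- ===== LEMMAS AND PROOFS =====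
-- invariant of B's single pass: a branded image wins outright; otherwise the
-- fallback (if set) and otherwise the first lifestyle image is returned
theorem pvOnePass_eq (images : List (List (String × String)))
    (fb : Option (List (String × String))) :
    pvOnePass images fb =
      match pvLoopBranded images with
      | some image => some image
      | none => match fb with
                | some f => some f
                | none => pvLoopLifestyle images := by
  induction images generalizing fb with
  | nil => cases fb <;> simp [pvOnePass, pvLoopBranded, pvLoopLifestyle]
  | cons image rest ih =>
      by_cases hb : pvIsBranded image
      · simp [pvOnePass, pvLoopBranded, hb]
      · cases fb with
        | some f => simp [pvOnePass, pvLoopBranded, hb, ih]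
        | none =>
            by_cases hl : pvIsLifestyle image <;>
              simp [pvOnePass, pvLoopBranded, pvLoopLifestyle, hb, hl, ih]

-- ===== VERDICT (by name: the statement is the Claim_ definition above) =====
theorem choose_lifestyle_image_spec : Claim_equal_choose_lifestyle_image := by
  intro images _
  unfold Spec_choose_lifestyle_image choose_lifestyle_image choose_lifestyle_image_alt
  rw [pvOnePass_eq]
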